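-- pv_equiv track=rewrite | github.com/DanielSun94/ppme | disease_screen/emr_structurize.py | initialize_symptom_info
-- ===== SOURCE A (Python) =====
-- def initialize_symptom_info(symptom_dict, unified_id_list):
--     symptom_info, general_symptom_dict = dict(), dict()
--     for unified_id in unified_id_list:
--         symptom_info[unified_id] = dict()
--         general_symptom_dict[unified_id] = dict()
--         for key in symptom_dict:
--             symptom_info[unified_id][key] = dict()
--             general_symptom_dict[unified_id][key] = "NA"
--             for factor_group in symptom_dict[key]:
--                 symptom_info[unified_id][key][factor_group] = dict()
--                 for factor in symptom_dict[key][factor_group]: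
--                     symptom_info[unified_id][key][factor_group][factor] = "NA"
--     return symptom_info, general_symptom_dict
-- ===== SOURCE B (Python) =====
-- def initialize_symptom_info(symptom_dict, unified_id_list):
--     # Recursive descent: rebuild the nesting generically, turning every leaf
--     # collection into {item: "NA"}, instead of three hand-written nested loops.
--     def fill(node):
--         if isinstance(node, dict):
--             return {k: fill(v) for k, v in node.items()}
--         return dict.fromkeys(node, "NA")
--
--     ids = dict.fromkeys(unified_id_list)  # distinct ids, first-occurrence order
--     symptom_info = {uid: fill(symptom_dict) for uid in ids}
--     general_symptom_dict = {uid: dict.fromkeys(symptom_dict, "NA") for uid in ids}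
--     return symptom_info, general_symptom_dict
-- ===== Notes on version B (the rewrite author's own statement) =====
-- stated objective: alternative
-- what changed: B replaces A's three hand-written nested mutating loops with a depth-generic recursive descent (fill) that rebuilds any nesting and maps every leaf collection to 'NA' via dict.fromkeys, applied to an explicitly deduplicated id list, with no dict mutation anywhere.
import Mathlib
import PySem

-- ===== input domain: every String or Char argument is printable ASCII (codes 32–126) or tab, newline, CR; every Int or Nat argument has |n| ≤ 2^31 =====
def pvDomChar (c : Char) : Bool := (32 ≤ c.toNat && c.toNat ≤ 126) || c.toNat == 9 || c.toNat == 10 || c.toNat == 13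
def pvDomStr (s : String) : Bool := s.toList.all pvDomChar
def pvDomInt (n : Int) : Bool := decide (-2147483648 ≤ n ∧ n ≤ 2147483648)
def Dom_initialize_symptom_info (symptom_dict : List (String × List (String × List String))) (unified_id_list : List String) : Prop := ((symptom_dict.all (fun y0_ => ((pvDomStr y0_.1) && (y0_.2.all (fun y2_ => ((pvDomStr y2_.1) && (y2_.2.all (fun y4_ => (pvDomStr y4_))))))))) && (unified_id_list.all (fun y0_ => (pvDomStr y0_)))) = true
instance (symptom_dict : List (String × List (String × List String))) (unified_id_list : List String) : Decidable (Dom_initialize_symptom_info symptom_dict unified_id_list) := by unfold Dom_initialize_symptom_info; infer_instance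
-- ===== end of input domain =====

-- B rebuilds the structure by a depth-generic recursive descent (fill) over the input plus
-- dict.fromkeys at the leaves, on an explicitly deduplicated id list, instead of A's three
-- hand-written nested mutating loops per id.

-- ===== PORT A =====
-- Dicts are PySem.Dict built by per-key insertion exactly as A assigns them, converted to
-- items lists once complete.  A's 'for key in symptom_dict: … symptom_dict[key]' iterates the
-- pairs: since Python dict keys are unique the looked-up value is the pair's own value, and
-- insert-with-overwrite reproduces Python's dict() collapse of any duplicate-key input list.

-- innermost loop: 'for factor in symptom_dict[key][factor_group]: …[factor] = "NA"'
def pvA_factorLoop (fs : List String) : PySem.Dict String String :=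
  fs.foldl (fun f factor => f.insert factor "NA") PySem.Dict.empty

-- 'for factor_group in symptom_dict[key]: …[factor_group] = dict(); <factor loop>'
def pvA_groupLoop (v : List (String × List String)) : PySem.Dict String (List (String × String)) :=
  v.foldl (fun g fg => g.insert fg.1 (pvA_factorLoop fg.2).items) PySem.Dict.empty

-- 'for key in symptom_dict: symptom_info[uid][key] = …; general_symptom_dict[uid][key] = "NA"; …'
def pvA_keyLoop (symptom_dict : List (String × List (String × List String))) :
    PySem.Dict String (List (String × List (String × String))) × PySem.Dict String String :=
  symptom_dict.foldl
    (fun ig kv => (ig.1.insert kv.1 (pvA_groupLoop kv.2).items, ig.2.insert kv.1 "NA"))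
    (PySem.Dict.empty, PySem.Dict.empty)

def initialize_symptom_info (symptom_dict : List (String × List (String × List String)))
    (unified_id_list : List String) :
    (List (String × List (String × List (String × List (String × String))))) ×
      (List (String × List (String × String))) :=
  -- 'for unified_id in unified_id_list: …' rebuilds the nested structure for every id
  let p :=
    unified_id_list.foldl
      (fun acc uid =>
        (acc.1.insert uid (pvA_keyLoop symptom_dict).1.items,
         acc.2.insert uid (pvA_keyLoop symptom_dict).2.items))
      ((PySem.Dict.empty : PySem.Dict String (List (String × List (String × List (String × String))))),
       (PySem.Dict.empty : PySem.Dict String (List (String × String))))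
  (p.1.items, p.2.items)

-- ===== PORT B =====
-- B's polymorphic recursive 'fill' is monomorphized per nesting level (Lean has no isinstance):
-- pvB_fill_leaf is the 'return dict.fromkeys(node, "NA")' branch ('.items' of it: ordered dedup
-- paired with "NA" = PySem.List.dedup), pvB_fill_group / pvB_fill_top are the dict branch
-- '{k: fill(v) for k, v in node.items()}' at the two dict levels.  A dict comprehension over
-- DISTINCT keys is the plain map of the key list.
def pvB_fill_leaf (fs : List String) : List (String × String) :=
  (PySem.List.dedup fs).map (fun f => (f, "NA"))

def pvB_fill_group (v : List (String × List String)) : List (String × List (String × String)) :=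
  (PySem.Dict.ofList v).items.map (fun kv => (kv.1, pvB_fill_leaf kv.2))

def pvB_fill_top (sd : List (String × List (String × List String))) :
    List (String × List (String × List (String × String))) :=
  (PySem.Dict.ofList sd).items.map (fun kv => (kv.1, pvB_fill_group kv.2))

def initialize_symptom_info_alt (symptom_dict : List (String × List (String × List String)))
    (unified_id_list : List String) :
    (List (String × List (String × List (String × List (String × String))))) ×
      (List (String × List (String × String))) :=
  -- ids = dict.fromkeys(unified_id_list): distinct ids, first-occurrence order
  let ids := PySem.List.dedup unified_id_list
  -- dict.fromkeys(symptom_dict, "NA") iterates the dict's (distinct) keys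
  let general := (PySem.Dict.ofList symptom_dict).items.map (fun kv => (kv.1, "NA"))
  (ids.map (fun uid => (uid, pvB_fill_top symptom_dict)),
   ids.map (fun uid => (uid, general)))

-- ===== PRECONDITION & SPEC =====
-- decidable equality of the (deeply nested) output type, spelled out level by level because
-- instance search does not go this deep on its own
def pvDecEqOut : DecidableEq ((List (String × List (String × List (String × List (String × String))))) × (List (String × List (String × String)))) :=
  haveI : DecidableEq (String × List (String × String)) := instDecidableEqProd
  haveI : DecidableEq (List (String × List (String × String))) := instDecidableEqList
  haveI : DecidableEq (String × List (String × List (String × String))) := instDecidableEqProd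
  haveI : DecidableEq (List (String × List (String × List (String × String)))) := instDecidableEqList
  haveI : DecidableEq (String × List (String × List (String × List (String × String)))) := instDecidableEqProd
  haveI : DecidableEq (List (String × List (String × List (String × List (String × String))))) := instDecidableEqList
  instDecidableEqProd

def Spec_initialize_symptom_info (symptom_dict : List (String × List (String × List String))) (unified_id_list : List String) (out : (List (String × List (String × List (String × List (String × String))))) × (List (String × List (String × String)))) : Prop := out = initialize_symptom_info_alt symptom_dict unified_id_list
instance (symptom_dict : List (String × List (String × List String))) (unified_id_list : List String) (out : (List (String × List (String × List (String × List (String × String))))) × (List (String × List (String × String)))) : Decidable (Spec_initialize_symptom_info symptom_dict unified_id_list out) := by unfold Spec_initialize_symptom_info; exact pvDecEqOut out _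

-- ===== CLAIM (what is proved, stated in full; the proofs are below) =====
def Claim_equal_initialize_symptom_info : Prop := ∀ (symptom_dict : List (String × List (String × List String))) (unified_id_list : List String), Dom_initialize_symptom_info symptom_dict unified_id_list → Spec_initialize_symptom_info symptom_dict unified_id_list (initialize_symptom_info symptom_dict unified_id_list)

-- ===== LEMMAS AND PROOFS =====

-- PySem.Dict.ofList is the fold of plain inserts from the empty dict.
theorem pv_ofList_eq_foldl {κ ν : Type} [BEq κ] (l : List (κ × ν)) :
    PySem.Dict.ofList l = l.foldl (fun d p => d.insert p.1 p.2) PySem.Dict.empty :=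
  PySem.Dict.ext_iff.mpr rfl

-- A fold that inserts the constant c, looked up with default c, always yields c.
theorem pv_getD_foldl_insert_const {κ β : Type} [BEq κ] [LawfulBEq κ] [DecidableEq κ]
    (l : List κ) (c : β) (d : PySem.Dict κ β) (h : ∀ k, d.getD k c = c) (k : κ) :
    (l.foldl (fun a x => a.insert x c) d).getD k c = c := by
  induction l generalizing d with
  | nil => exact h k
  | cons x l ih =>
    refine ih _ (fun k' => ?_)
    rw [PySem.Dict.getD_insert]
    split <;> simp [h]

-- Inserting one constant value under each key of a list, from the empty dict, yields the
-- ordered dedup of the list paired with that value (dict.fromkeys semantics).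
theorem pv_fold_insert_const_items {ν : Type} (ks : List String) (t : ν) :
    (ks.foldl (fun (d : PySem.Dict String ν) k => d.insert k t) PySem.Dict.empty).items
      = (PySem.List.dedup ks).map (fun k => (k, t)) := by
  have hnd : (ks.foldl (fun (d : PySem.Dict String ν) k => d.insert k t)
      PySem.Dict.empty).keys.Nodup :=
    PySem.Dict.nodup_keys_foldl_insert ks (fun _ _ => t) _ PySem.Dict.nodup_keys_empty
  rw [PySem.Dict.items_eq_map_keys _ hnd t]
  have hkeys : (ks.foldl (fun (d : PySem.Dict String ν) k => d.insert k t)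
      PySem.Dict.empty).keys = PySem.List.dedup ks := by
    rw [PySem.Dict.keys_foldl_insert ks (fun _ _ => t), PySem.Dict.keys_empty,
      PySem.Set.update_nil_left, ← PySem.List.dedup_eq_ofList]
  rw [hkeys]
  exact List.map_congr_left (fun k _ => by
    rw [pv_getD_foldl_insert_const ks t PySem.Dict.empty
      (fun k' => PySem.Dict.getD_empty k' t) k])

-- Inserting f-transformed values tracks inserting the raw values: the items lists stay
-- related by mapping f over the value component.
theorem pv_items_foldl_insert_map {κ β γ : Type} [BEq κ] [LawfulBEq κ] [DecidableEq κ]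
    (f : β → γ) (l : List (κ × β)) (d : PySem.Dict κ β) (d' : PySem.Dict κ γ)
    (h : d'.items = d.items.map (fun p => (p.1, f p.2))) :
    (l.foldl (fun a p => a.insert p.1 (f p.2)) d').items
      = (l.foldl (fun a p => a.insert p.1 p.2) d).items.map (fun p => (p.1, f p.2)) := by
  induction l generalizing d d' with
  | nil => simpa using h
  | cons p l ih =>
    simp only [List.foldl_cons]
    apply ih
    have hkeys : d'.keys = d.keys := by
      simp only [PySem.Dict.keys, h, List.map_map]
      rfl
    have hc : d'.contains p.1 = d.contains p.1 := by
      rw [PySem.Dict.contains_eq_decide_mem_keys, PySem.Dict.contains_eq_decide_mem_keys, hkeys]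
    rw [PySem.Dict.items_insert, PySem.Dict.items_insert, hc]
    by_cases hmem : d.contains p.1 = true
    · simp only [hmem, if_true, h, List.map_map]
      apply List.map_congr_left
      intro q _
      by_cases hq : q.1 = p.1 <;> simp [hq]
    · simp [hmem, h]

-- A's factor-group loop produces B's pvB_fill_group for the same pair list.
theorem pv_groupLoop_items (v : List (String × List String)) :
    (pvA_groupLoop v).items = pvB_fill_group v := by
  unfold pvA_groupLoop pvB_fill_group
  have h := pv_items_foldl_insert_map (fun fs : List String => (pvA_factorLoop fs).items)
    v PySem.Dict.empty PySem.Dict.empty rfl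
  beta_reduce at h
  rw [h, ← pv_ofList_eq_foldl]
  exact List.map_congr_left (fun q _ => by
    unfold pvA_factorLoop pvB_fill_leaf
    rw [pv_fold_insert_const_items q.2 "NA"])

-- A's key loop, first component: B's pvB_fill_top.
theorem pv_keyLoop_fst (sd : List (String × List (String × List String))) :
    (pvA_keyLoop sd).1.items = pvB_fill_top sd := by
  unfold pvA_keyLoop pvB_fill_top
  have hsplit := PySem.List.foldl_prod_mk
    (fun (a : PySem.Dict String (List (String × List (String × String))))
        (kv : String × List (String × List String)) => a.insert kv.1 (pvA_groupLoop kv.2).items)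
    (fun (a : PySem.Dict String String) (kv : String × List (String × List String)) =>
      a.insert kv.1 "NA")
    sd PySem.Dict.empty PySem.Dict.empty
  beta_reduce at hsplit
  rw [hsplit]
  have h := pv_items_foldl_insert_map
    (fun v : List (String × List String) => (pvA_groupLoop v).items)
    sd PySem.Dict.empty PySem.Dict.empty rfl
  beta_reduce at h
  rw [h, ← pv_ofList_eq_foldl]
  exact List.map_congr_left (fun q _ => by rw [pv_groupLoop_items])

-- A's key loop, second component: B's flat general entry list.
theorem pv_keyLoop_snd (sd : List (String × List (String × List String))) :
    (pvA_keyLoop sd).2.items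
      = (PySem.Dict.ofList sd).items.map (fun kv => (kv.1, "NA")) := by
  unfold pvA_keyLoop
  have hsplit := PySem.List.foldl_prod_mk
    (fun (a : PySem.Dict String (List (String × List (String × String))))
        (kv : String × List (String × List String)) => a.insert kv.1 (pvA_groupLoop kv.2).items)
    (fun (a : PySem.Dict String String) (kv : String × List (String × List String)) =>
      a.insert kv.1 "NA")
    sd PySem.Dict.empty PySem.Dict.empty
  beta_reduce at hsplit
  rw [hsplit]
  have h := pv_items_foldl_insert_map
    (fun (_ : List (String × List String)) => ("NA" : String))
    sd PySem.Dict.empty PySem.Dict.empty rfl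
  beta_reduce at h
  rw [h, ← pv_ofList_eq_foldl]

-- ===== VERDICT (by name: the statement is the Claim_ definition above) =====
theorem initialize_symptom_info_spec : Claim_equal_initialize_symptom_info := by
  intro sd ids _
  unfold Spec_initialize_symptom_info initialize_symptom_info initialize_symptom_info_alt
  have hsplit := PySem.List.foldl_prod_mk
    (fun (a : PySem.Dict String (List (String × List (String × List (String × String)))))
        (uid : String) => a.insert uid (pvA_keyLoop sd).1.items)
    (fun (a : PySem.Dict String (List (String × String))) (uid : String) =>
      a.insert uid (pvA_keyLoop sd).2.items)
    ids PySem.Dict.empty PySem.Dict.empty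
  beta_reduce at hsplit
  rw [hsplit]
  simp only [pv_fold_insert_const_items, pv_keyLoop_fst, pv_keyLoop_snd]
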